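-- pv_equiv track=rewrite | github.com/GoRosoe/programmers | 프로그래머스/0/181887. 홀수 vs 짝수/홀수 vs 짝수.py | solution
-- ===== SOURCE A (Python) =====
-- def solution(num_list):
--     odd = even = 0
--     for i in range(len(num_list)):
--         if i % 2 == 1:
--             odd += num_list[i]
--         else:
--             even += num_list[i]
--     return odd if odd > even else even
-- ===== SOURCE B (Python) =====
-- def solution(num_list):
--     even = sum(num_list[::2])
--     odd = sum(num_list[1::2])
--     return max(odd, even)
-- ===== Notes on version B (the rewrite author's own statement) =====
-- stated objective: idiomatic
-- what changed: Replaces the single index loop with a modulo branch by two staged strided-slice passes (sum(num_list[::2]) and sum(num_list[1::2])) and the if-expression by max; the work moves from a Python-level per-index loop into C-level slicing and sum.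
import Mathlib
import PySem

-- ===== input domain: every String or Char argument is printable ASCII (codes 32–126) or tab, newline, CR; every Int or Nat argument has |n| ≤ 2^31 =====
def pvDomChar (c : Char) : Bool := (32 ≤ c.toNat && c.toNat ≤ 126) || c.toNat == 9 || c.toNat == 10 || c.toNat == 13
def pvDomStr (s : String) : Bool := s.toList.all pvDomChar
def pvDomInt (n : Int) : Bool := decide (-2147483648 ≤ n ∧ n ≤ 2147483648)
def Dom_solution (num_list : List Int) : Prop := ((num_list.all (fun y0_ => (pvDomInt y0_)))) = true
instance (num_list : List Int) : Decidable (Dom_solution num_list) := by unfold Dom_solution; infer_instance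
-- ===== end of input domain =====

-- B replaces A's single index/parity loop by two staged strided-slice passes and max; same return value everywhere.

-- ===== PORT A =====
-- literal port of A: fold over range(len(num_list)) with (odd, even) state, branch on i % 2
def solution (num_list : List Int) : Int :=
  let st := (PySem.List.pyRange 0 (num_list.length : Int) 1).foldl
    (fun (s : Int × Int) i =>
      if i % 2 == 1 then (s.1 + PySem.List.pyGetD num_list i 0, s.2)
      else (s.1, s.2 + PySem.List.pyGetD num_list i 0)) (0, 0)
  if st.1 > st.2 then st.1 else st.2

-- ===== PORT B =====
-- even = sum(num_list[::2]); odd = sum(num_list[1::2]); max(odd, even).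
-- slice? always returns some here (step 2 ≠ 0), so getD [] is only a totalisation guard.
def solution_alt (num_list : List Int) : Int :=
  let even := ((PySem.List.slice? num_list none none 2).getD []).sum
  let odd := ((PySem.List.slice? num_list (some 1) none 2).getD []).sum
  max odd even

-- ===== PRECONDITION & SPEC =====
def Spec_solution (num_list : List Int) (out : Int) : Prop := out = solution_alt num_list
instance (num_list : List Int) (out : Int) : Decidable (Spec_solution num_list out) := by unfold Spec_solution; infer_instance

-- ===== CLAIM (what is proved, stated in full; the proofs are below) =====
def Claim_equal_solution : Prop := ∀ (num_list : List Int), Dom_solution num_list → Spec_solution num_list (solution num_list)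

-- ===== LEMMAS AND PROOFS =====

-- the elements at even / odd positions, by two-step structural recursion (proof helpers)
def pvEvens : List Int → List Int
  | [] => []
  | [x] => [x]
  | x :: _ :: r => x :: pvEvens r

def pvOdds : List Int → List Int
  | [] => []
  | [_] => []
  | _ :: y :: r => y :: pvOdds r

-- A's loop state, two elements per step (proof helper)
def pvGo : List Int → Int → Int → Int × Int
  | [], even, odd => (even, odd)
  | [x], even, odd => (even + x, odd)
  | x :: y :: rest, even, odd => pvGo rest (even + x) (odd + y)

theorem pvGo_eq : ∀ (xs : List Int) (e o : Int),
    pvGo xs e o = (e + (pvEvens xs).sum, o + (pvOdds xs).sum)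
  | [], e, o => by simp [pvGo, pvEvens, pvOdds]
  | [x], e, o => by simp [pvGo, pvEvens, pvOdds]
  | x :: y :: r, e, o => by
      simp [pvGo, pvEvens, pvOdds, pvGo_eq r (e + x) (o + y)]; constructor <;> ring

theorem pvGo_key : ∀ (xs : List Int) (s odd even : Int), s % 2 = 0 →
    (PySem.List.enumerate xs s).foldl
      (fun (st : Int × Int) (p : Int × Int) =>
        if p.1 % 2 == 1 then (st.1 + p.2, st.2) else (st.1, st.2 + p.2)) (odd, even)
    = ((pvGo xs even odd).2, (pvGo xs even odd).1)
  | [], s, odd, even, h => by simp [PySem.List.enumerate, pvGo]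
  | [x], s, odd, even, h => by
      have hs : (s % 2 == 1) = false := by simp; omega
      simp only [PySem.List.enumerate, List.foldl_cons, List.foldl_nil, hs,
        Bool.false_eq_true, if_false, pvGo]
  | x :: y :: rest, s, odd, even, h => by
      have hs : (s % 2 == 1) = false := by simp; omega
      have hs1 : ((s + 1) % 2 == 1) = true := by simp; omega
      have ih := pvGo_key rest (s + 1 + 1) (odd + y) (even + x) (by omega)
      simp only [PySem.List.enumerate, List.foldl_cons, hs, hs1, if_true, if_false,
        Bool.false_eq_true, pvGo]
      exact ih

theorem foldA_eq (xs : List Int) :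
    (PySem.List.pyRange 0 (xs.length : Int) 1).foldl
      (fun (s : Int × Int) i =>
        if i % 2 == 1 then (s.1 + PySem.List.pyGetD xs i 0, s.2)
        else (s.1, s.2 + PySem.List.pyGetD xs i 0)) (0, 0)
    = ((pvOdds xs).sum, (pvEvens xs).sum) := by
  have he := PySem.List.enumerate_eq_map_pyRange (xs := xs) (d := 0)
  have := pvGo_key xs 0 0 0 (by decide)
  rw [he, List.foldl_map] at this
  rw [pvGo_eq] at this
  simpa using this

-- characterise the two strided slices
theorem filterMap_evens : ∀ (xs : List Int),
    List.filterMap (fun k => xs[2 * k]?) (List.range ((xs.length + 1) / 2)) = pvEvens xs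
  | [] => by simp [pvEvens]
  | [x] => by simp [pvEvens]
  | x :: y :: r => by
      have hlen : ((x :: y :: r).length + 1) / 2 = (r.length + 1) / 2 + 1 := by
        simp only [List.length_cons]; omega
      rw [hlen, List.range_succ_eq_map, List.filterMap_cons, List.filterMap_map]
      have h0 : (x :: y :: r)[2 * 0]? = some x := by simp
      rw [h0]
      have hf : ((fun k => (x :: y :: r)[2 * k]?) ∘ (fun i => i + 1))
          = fun k => r[2 * k]? := by
        funext k
        have h : 2 * (k + 1) = 2 * k + 1 + 1 := by ring
        simp [Function.comp, h]
      rw [hf, filterMap_evens r]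
      simp [pvEvens]

theorem filterMap_odds : ∀ (xs : List Int),
    List.filterMap (fun k => xs[2 * k + 1]?) (List.range (xs.length / 2)) = pvOdds xs
  | [] => by simp [pvOdds]
  | [x] => by simp [pvOdds]
  | x :: y :: r => by
      have hlen : (x :: y :: r).length / 2 = r.length / 2 + 1 := by
        simp only [List.length_cons]; omega
      rw [hlen, List.range_succ_eq_map, List.filterMap_cons, List.filterMap_map]
      have h0 : (x :: y :: r)[2 * 0 + 1]? = some y := by simp
      rw [h0]
      have hf : ((fun k => (x :: y :: r)[2 * k + 1]?) ∘ (fun i => i + 1))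
          = fun k => r[2 * k + 1]? := by
        funext k
        have h : 2 * (k + 1) + 1 = 2 * k + 1 + 1 + 1 := by ring
        simp [Function.comp, h]
      rw [hf, filterMap_odds r]
      simp [pvOdds]

theorem slice2_evens (xs : List Int) :
    PySem.List.slice? xs none none 2 = some (pvEvens xs) := by
  unfold PySem.List.slice? PySem.List.sliceIndices
  simp only [if_neg (by norm_num : ¬ (2:Int) = 0)]
  norm_num
  have hcount : (if 0 < xs.length
      then (((xs.length : Int) + 2 - 1) / 2).toNat else 0) = (xs.length + 1) / 2 := by
    split_ifs with h
    · omega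
    · omega
  rw [hcount]
  rw [← filterMap_evens xs]
  congr 1

theorem slice2_odds (xs : List Int) :
    PySem.List.slice? xs (some 1) none 2 = some (pvOdds xs) := by
  unfold PySem.List.slice? PySem.List.sliceIndices
  simp only [if_neg (by norm_num : ¬ (2:Int) = 0)]
  norm_num
  by_cases hx : xs = []
  · subst hx; simp [pvOdds]
  · have hpos : 0 < xs.length := List.length_pos_iff.mpr hx
    have hmin : min (1:Int) (xs.length : Int) = 1 := by omega
    rw [hmin]
    have hcount : (if 1 < xs.length
        then (((xs.length : Int) - 1 + 2 - 1) / 2).toNat else 0) = xs.length / 2 := by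
      split_ifs with h
      · omega
      · omega
    rw [hcount, ← filterMap_odds xs]
    congr 1
    funext k
    congr 1
    omega

-- ===== VERDICT (by name: the statement is the Claim_ definition above) =====
theorem solution_spec : Claim_equal_solution := by
  intro xs _
  unfold Spec_solution solution solution_alt
  rw [foldA_eq, slice2_evens, slice2_odds]
  simp only [Option.getD_some]
  omega
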